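-- pv_equiv track=rewrite | github.com/kdavila/lecturemath | ACCESS2021_release/AccessMath/preprocessing/content/video_segmenter.py | find_signal_peaks
-- ===== SOURCE A (Python) =====
-- def find_signal_peaks(start_frame, end_frame, signal_dict):
--     all_peaks = []
--     current_peak_start = None
--     current_peak_highest = None
--     going_up = None
--     for frame_idx in range(start_frame, end_frame + 1):
--         if current_peak_start is None:
--             # starting a new peak region ...
--             current_peak_start = frame_idx
--             current_peak_highest = frame_idx
--             # assume we start going up ...
--             going_up = True
--         else:
--             # there are three posibilities:
--             # 1) the value is higher than previous, check status
--             #    1.a) going up? peak is just growing, update it!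
--             #    1.b) going down? last peak ends and new one starts!
--             # 2) the value is lower than previous. no longer going up!
--             # 3) the value is the same. A plateu is extending, nothing to do here!
--             if signal_dict[frame_idx] > signal_dict[frame_idx - 1]:
--                 # check if we were going up ...
--                 if going_up:
--                     # still going up ... update peak
--                     current_peak_highest = frame_idx
--                 else:
--                     # we were not going up but now we start going up again, new peak starts!
--                     all_peaks.append((current_peak_start, current_peak_highest, frame_idx -1))
--                     # restart peak search ...
--                     current_peak_start = frame_idx
--                     current_peak_highest = frame_idx
--                     # assume we start going up ...
--                     going_up = True
--             else:
--                 # check ....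
--                 if signal_dict[frame_idx] < signal_dict[frame_idx - 1]:
--                     # signal is lower ... check
--                     if going_up:
--                         # mark that we start going down!
--                         going_up = False
--                     else:
--                         # we were going down already, nothing to do for now
--                         pass
--                 else:
--                     # a plateu (either going up or down ... nothing to do for now)
--                     pass
--
--     if current_peak_start is not None:
--         # save last peak
--         all_peaks.append((current_peak_start, current_peak_highest, end_frame))
--
--     return all_peaks
-- ===== SOURCE B (Python) =====
-- def find_signal_peaks(start_frame, end_frame, signal_dict):
--     if end_frame < start_frame:
--         return []
--     # compress the signal to its strict moves: (frame, is_rise), plateaus dropped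
--     moves = [(f, signal_dict[f] > signal_dict[f - 1])
--              for f in range(start_frame + 1, end_frame + 1)
--              if signal_dict[f] != signal_dict[f - 1]]
--     return _peaks_of_moves(start_frame, end_frame, moves)
--
--
-- def _peaks_of_moves(seg_start, end_frame, moves):
--     # one peak = a maximal run of rises (fixing the top) followed by a maximal
--     # run of falls; the next rise, if any, opens the next peak (recursively)
--     top = seg_start
--     i = 0
--     while i < len(moves) and moves[i][1]:
--         top = moves[i][0]
--         i += 1
--     while i < len(moves) and not moves[i][1]:
--         i += 1
--     if i == len(moves):
--         return [(seg_start, top, end_frame)]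
--     nxt = moves[i][0]
--     return [(seg_start, top, nxt - 1)] + _peaks_of_moves(nxt, end_frame, moves[i + 1:])
-- ===== Notes on version B (the rewrite author's own statement) =====
-- stated objective: alternative
-- what changed: B first compresses the signal to its strict moves (plateaus dropped), then recursively carves one peak at a time by consuming a maximal run of rises (whose last frame is the top) followed by a maximal run of falls, with no going_up flag or per-frame state machine; Pre_ excludes inputs where A's loop reads a missing dict key (KeyError).
import Mathlib
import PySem

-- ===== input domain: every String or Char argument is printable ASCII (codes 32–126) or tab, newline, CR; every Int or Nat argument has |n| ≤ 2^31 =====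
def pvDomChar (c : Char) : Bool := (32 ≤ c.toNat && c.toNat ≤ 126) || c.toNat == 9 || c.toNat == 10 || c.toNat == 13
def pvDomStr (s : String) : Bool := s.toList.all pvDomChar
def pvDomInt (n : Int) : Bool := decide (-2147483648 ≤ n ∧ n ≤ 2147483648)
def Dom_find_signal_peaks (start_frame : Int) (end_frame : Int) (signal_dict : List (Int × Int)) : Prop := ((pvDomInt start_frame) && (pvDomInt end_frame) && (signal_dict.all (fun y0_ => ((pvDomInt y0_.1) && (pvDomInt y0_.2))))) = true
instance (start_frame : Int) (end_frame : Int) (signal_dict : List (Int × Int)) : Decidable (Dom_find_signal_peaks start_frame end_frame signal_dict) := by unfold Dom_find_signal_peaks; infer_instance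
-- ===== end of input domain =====

-- B compresses the signal to its strict moves, then recursively carves one peak per
-- maximal rise-run + fall-run; return values agree on Pre_ (all keys present).

-- first-match association-list lookup (dict lookup; default never read under Pre_)
def alGet (d : List (Int × Int)) (k : Int) : Int :=
  ((d.find? (fun p => p.1 == k)).map (fun p => p.2)).getD 0

-- ===== PORT A =====
-- state: (all_peaks, current peak as Option (start, highest), going_up)
def fspStepA (d : List (Int × Int)) (st : List (Int × Int × Int) × Option (Int × Int) × Bool) (frame : Int) :
    List (Int × Int × Int) × Option (Int × Int) × Bool :=
  match st with
  | (peaks, none, _) => (peaks, some (frame, frame), true)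
  | (peaks, some (ps, ph), gu) =>
    if alGet d frame > alGet d (frame - 1) then
      if gu then (peaks, some (ps, frame), gu)
      else (peaks ++ [(ps, ph, frame - 1)], some (frame, frame), true)
    else
      if alGet d frame < alGet d (frame - 1) then
        if gu then (peaks, some (ps, ph), false)
        else (peaks, some (ps, ph), gu)
      else (peaks, some (ps, ph), gu)

def find_signal_peaks (start_frame : Int) (end_frame : Int) (signal_dict : List (Int × Int)) : List (Int × Int × Int) :=
  let st := (PySem.List.pyRange start_frame (end_frame + 1) 1).foldl (fspStepA signal_dict) ([], none, false)
  match st with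
  | (peaks, some (ps, ph), _) => peaks ++ [(ps, ph, end_frame)]
  | (peaks, none, _) => peaks

-- ===== PORT B =====
-- one strict move of the comprehension: (f, cur > prev) kept iff cur ≠ prev
def fspMove (d : List (Int × Int)) (f : Int) : Option (Int × Bool) :=
  if alGet d f ≠ alGet d (f - 1) then some (f, decide (alGet d f > alGet d (f - 1))) else none

def fspMoves (start_frame : Int) (end_frame : Int) (d : List (Int × Int)) : List (Int × Bool) :=
  (PySem.List.pyRange (start_frame + 1) (end_frame + 1) 1).filterMap (fspMove d)

-- first while loop: consume the maximal run of rises, tracking the top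
def fspAscend : Int → List (Int × Bool) → Int × List (Int × Bool)
  | top, [] => (top, [])
  | top, (f, r) :: t => if r then fspAscend f t else (top, (f, r) :: t)

-- second while loop: skip the maximal run of falls
def fspDescend : List (Int × Bool) → List (Int × Bool)
  | [] => []
  | (f, r) :: t => if r then (f, r) :: t else fspDescend t

-- length facts cited by peaksOfMoves' termination proof
theorem fspAscend_len (top : Int) (ms : List (Int × Bool)) :
    (fspAscend top ms).2.length ≤ ms.length := by
  induction ms generalizing top with
  | nil => simp [fspAscend]
  | cons m t ih =>
    obtain ⟨f, r⟩ := m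
    by_cases hr : r <;> simp [fspAscend, hr]
    exact Nat.le_succ_of_le (ih f)

theorem fspDescend_len (ms : List (Int × Bool)) : (fspDescend ms).length ≤ ms.length := by
  induction ms with
  | nil => simp [fspDescend]
  | cons m t ih =>
    obtain ⟨f, r⟩ := m
    by_cases hr : r <;> simp [fspDescend, hr]
    exact Nat.le_succ_of_le ih

-- _peaks_of_moves: one peak per rise-run + fall-run, recursing on the remainder
def fspPeaksOfMoves (seg_start : Int) (end_frame : Int) (moves : List (Int × Bool)) : List (Int × Int × Int) :=
  match h : fspDescend (fspAscend seg_start moves).2 with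
  | [] => [(seg_start, (fspAscend seg_start moves).1, end_frame)]
  | (nxt, _) :: rest => (seg_start, (fspAscend seg_start moves).1, nxt - 1) :: fspPeaksOfMoves nxt end_frame rest
termination_by moves.length
decreasing_by
  have h1 := fspAscend_len seg_start moves
  have h2 := fspDescend_len (fspAscend seg_start moves).2
  rw [h] at h2
  simp at h2
  omega

def find_signal_peaks_alt (start_frame : Int) (end_frame : Int) (signal_dict : List (Int × Int)) : List (Int × Int × Int) :=
  if end_frame < start_frame then []
  else fspPeaksOfMoves start_frame end_frame (fspMoves start_frame end_frame signal_dict)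

-- ===== PRECONDITION & SPEC =====
-- Pre_ excludes inputs where the Python loop reads a missing dict key (KeyError): when the
-- range has at least two frames, every frame in [start_frame, end_frame] must be a key.
def Pre_find_signal_peaks (start_frame : Int) (end_frame : Int) (signal_dict : List (Int × Int)) : Prop :=
  end_frame ≤ start_frame ∨
    (end_frame - start_frame + 1
      = (((signal_dict.map Prod.fst).dedup.filter
            (fun k => decide (start_frame ≤ k ∧ k ≤ end_frame))).length : Int))
instance (start_frame : Int) (end_frame : Int) (signal_dict : List (Int × Int)) : Decidable (Pre_find_signal_peaks start_frame end_frame signal_dict) := by unfold Pre_find_signal_peaks; infer_instance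

def pvWitness_find_signal_peaks : Int × Int × (List (Int × Int)) := (0, 2, [(0, 1), (1, 2), (2, 1)])

def Spec_find_signal_peaks (start_frame : Int) (end_frame : Int) (signal_dict : List (Int × Int)) (out : List (Int × Int × Int)) : Prop := out = find_signal_peaks_alt start_frame end_frame signal_dict
instance (start_frame : Int) (end_frame : Int) (signal_dict : List (Int × Int)) (out : List (Int × Int × Int)) : Decidable (Spec_find_signal_peaks start_frame end_frame signal_dict out) := by unfold Spec_find_signal_peaks; infer_instance

-- ===== CLAIM (what is proved, stated in full; the proofs are below) =====
def Claim_equal_find_signal_peaks : Prop := ∀ (start_frame : Int) (end_frame : Int) (signal_dict : List (Int × Int)), Dom_find_signal_peaks start_frame end_frame signal_dict → Pre_find_signal_peaks start_frame end_frame signal_dict → Spec_find_signal_peaks start_frame end_frame signal_dict (find_signal_peaks start_frame end_frame signal_dict)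

-- ===== LEMMAS AND PROOFS =====

-- abstract form of A's remaining loop over the compressed move list
def fspF (endf : Int) : List (Int × Bool) → Int → Int → Bool → List (Int × Int × Int)
  | [], ps, ph, _ => [(ps, ph, endf)]
  | (f, r) :: t, ps, ph, gu =>
    if r then (if gu then fspF endf t ps f true else (ps, ph, f - 1) :: fspF endf t f f true)
    else fspF endf t ps ph false

-- finalization of A's fold state
def fspFin (endf : Int) (st : List (Int × Int × Int) × Option (Int × Int) × Bool) : List (Int × Int × Int) :=
  match st with
  | (peaks, some (ps, ph), _) => peaks ++ [(ps, ph, endf)]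
  | (peaks, none, _) => peaks

-- the peak emitted for the current segment, plus the recursion on the remainder
def fspSeg (endf : Int) (ps : Int) (top : Int) (rest : List (Int × Bool)) : List (Int × Int × Int) :=
  match rest with
  | [] => [(ps, top, endf)]
  | (nxt, _) :: r => (ps, top, nxt - 1) :: fspPeaksOfMoves nxt endf r

-- one-step unfolding of fspPeaksOfMoves through fspSeg
theorem fspPeaksOfMoves_unfold (s endf : Int) (ms : List (Int × Bool)) :
    fspPeaksOfMoves s endf ms = fspSeg endf s (fspAscend s ms).1 (fspDescend (fspAscend s ms).2) := by
  rw [fspPeaksOfMoves]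
  rcases fspDescend (fspAscend s ms).2 with _ | ⟨⟨nxt, b⟩, rest⟩ <;> simp [fspSeg]

-- A's fold over the frames, once a peak is live, is fspF over the compressed moves
theorem fspA_fold (d : List (Int × Int)) (endf : Int) (l : List Int) :
    ∀ (pk : List (Int × Int × Int)) (ps ph : Int) (gu : Bool),
      fspFin endf (l.foldl (fspStepA d) (pk, some (ps, ph), gu))
        = pk ++ fspF endf (l.filterMap (fspMove d)) ps ph gu := by
  induction l with
  | nil => intro pk ps ph gu; simp [fspFin, fspF]
  | cons f t ih =>
    intro pk ps ph gu
    by_cases h1 : alGet d f > alGet d (f - 1)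
    · have hne : alGet d f ≠ alGet d (f - 1) := by omega
      by_cases hg : gu
      · simp [fspStepA, fspMove, h1, hne, hg, fspF, ih]
      · simp [fspStepA, fspMove, h1, hne, hg, fspF, ih]
    · by_cases h2 : alGet d f < alGet d (f - 1)
      · have hne : alGet d f ≠ alGet d (f - 1) := by omega
        by_cases hg : gu <;>
          simp [fspStepA, fspMove, h1, h2, hne, hg, fspF, ih]
      · have heq : alGet d f = alGet d (f - 1) := by omega
        simp [fspStepA, fspMove, heq, ih]

-- fspF matches B's ascend/descend decomposition (joint induction over both flag values)
theorem fspF_eq (endf : Int) (ms : List (Int × Bool)) :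
    ∀ (ps ph : Int),
      (fspF endf ms ps ph true
        = fspSeg endf ps (fspAscend ph ms).1 (fspDescend (fspAscend ph ms).2))
      ∧ (fspF endf ms ps ph false = fspSeg endf ps ph (fspDescend ms)) := by
  induction ms with
  | nil => intro ps ph; simp [fspF, fspAscend, fspDescend, fspSeg]
  | cons m t ih =>
    intro ps ph
    obtain ⟨f, r⟩ := m
    cases r
    · constructor
      · simpa [fspF, fspAscend, fspDescend] using (ih ps ph).2
      · simpa [fspF, fspDescend] using (ih ps ph).2
    · constructor
      · simpa [fspF, fspAscend] using (ih ps f).1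
      · simp only [fspF, fspDescend, fspSeg]
        simp only [if_pos trivial, Bool.false_eq_true, if_false, List.cons.injEq, true_and]
        rw [fspPeaksOfMoves_unfold]
        exact (ih f f).1

theorem find_signal_peaks_eq (s e : Int) (d : List (Int × Int)) :
    find_signal_peaks s e d = find_signal_peaks_alt s e d := by
  by_cases h : e < s
  · have h0 : (e + 1 - s).toNat = 0 := by omega
    have hr : PySem.List.pyRange s (e + 1) 1 = [] := by
      rw [PySem.List.pyRange_one, h0]; rfl
    simp [find_signal_peaks, find_signal_peaks_alt, hr, h]
  · have hlt : s < e + 1 := by omega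
    have hA : find_signal_peaks s e d
        = fspFin e ((PySem.List.pyRange s (e + 1) 1).foldl (fspStepA d) ([], none, false)) := by
      rw [find_signal_peaks]; rfl
    rw [hA, PySem.List.pyRange_one_cons hlt, List.foldl_cons]
    have hfirst : fspStepA d ([], none, false) s = ([], some (s, s), true) := rfl
    rw [hfirst, fspA_fold]
    rw [find_signal_peaks_alt, if_neg h, fspPeaksOfMoves_unfold]
    simpa [fspMoves] using (fspF_eq e ((PySem.List.pyRange (s + 1) (e + 1) 1).filterMap (fspMove d)) s s).1

-- ===== VERDICT (by name: the statement is the Claim_ definition above) =====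
theorem find_signal_peaks_spec : Claim_equal_find_signal_peaks := by
  intro s e d _ _
  unfold Spec_find_signal_peaks
  exact find_signal_peaks_eq s e d
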